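-- pv_equiv track=rewrite | github.com/volcengine/verl | atropos/environments/intern_bootcamp/internbootcamp_lib/internbootcamp/bootcamp/cdevelopingskills/cdevelopingskills.py | _calculate_solution
-- ===== SOURCE A (Python) =====
-- def _calculate_solution(n, k, a_list):
--     total = sum(x // 10 for x in a_list)
--     remainder_counts = [0] * 10  # 索引对应delta值1-9（0位置不使用）
--
--     for x in a_list:
--         rem = x % 10
--         if rem != 0:
--             delta = 10 - rem
--             if 1 <= delta <= 9:
--                 remainder_counts[delta] += 1
--
--     # 按delta从大到小处理（9到1）
--     for delta in range(9, 0, -1):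
--         if k <= 0:
--             break
--         count = remainder_counts[delta]
--         if count == 0:
--             continue
--
--         max_possible = min(k // delta, count)
--         total += max_possible
--         k -= max_possible * delta
--
--     # 处理剩余k值
--     total += k // 10
--     return min(total, 10 * n)
-- ===== SOURCE B (Python) =====
-- def _calculate_solution(n, k, a_list):
--     def go(d, k):
--         if d == 0 or k <= 0:
--             return k // 10
--         m = min(k // d, sum(1 for x in a_list if x % 10 == 10 - d))
--         return m + go(d - 1, k - m * d)
--     return min(sum(x // 10 for x in a_list) + go(9, k), 10 * n)
-- ===== Notes on version B (the rewrite author's own statement) =====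
-- stated objective: simpler
-- what changed: Replaces A's bucket-count array, iterative break/continue loop and separate leftover step by a single short recursive descent over delta=9..0 that counts each bucket by scanning the list on demand and folds the leftover k//10 into its base case.
import Mathlib
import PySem

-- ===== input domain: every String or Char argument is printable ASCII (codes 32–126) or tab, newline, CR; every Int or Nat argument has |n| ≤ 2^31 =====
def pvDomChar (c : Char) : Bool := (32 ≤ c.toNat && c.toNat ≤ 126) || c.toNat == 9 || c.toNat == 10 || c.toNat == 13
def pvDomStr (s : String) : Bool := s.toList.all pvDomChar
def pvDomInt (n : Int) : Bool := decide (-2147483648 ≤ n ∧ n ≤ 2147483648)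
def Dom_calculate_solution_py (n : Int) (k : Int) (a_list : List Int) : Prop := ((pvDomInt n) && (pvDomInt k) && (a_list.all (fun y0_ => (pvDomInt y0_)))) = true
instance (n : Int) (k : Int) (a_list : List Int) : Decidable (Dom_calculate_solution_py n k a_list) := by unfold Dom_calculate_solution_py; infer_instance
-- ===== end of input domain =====

-- B replaces A's bucket-count array, iterative loop with break/continue and separate
-- leftover step by one recursive descent over delta = 9..0 that counts each bucket by
-- scanning the list on demand and folds the leftover k//10 into its base case (objective: simpler).

-- ===== PORT A =====
-- the 'for x in a_list' loop body building remainder_counts ([0]*10 is the initial accumulator)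
def pvACountStep (cs : List Int) (x : Int) : List Int :=
  let rem := PySem.Int.mod x 10
  if rem ≠ 0 then
    let delta := 10 - rem
    if 1 ≤ delta ∧ delta ≤ 9 then
      -- remainder_counts[delta] += 1 ; delta ∈ [1,9] and the list has length 10, so the
      -- index is always in range and the total forms pyGetD/pySetD are exact here
      PySem.List.pySetD cs delta (PySem.List.pyGetD cs delta 0 + 1)
    else cs
  else cs

-- the 'for delta in range(9, 0, -1)' loop with its break, carrying (total, k)
def pvALoop : List Int → List Int → Int → Int → Int × Int
  | [], _, total, k => (total, k)
  | delta :: rest, counts, total, k =>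
    if k ≤ 0 then (total, k)
    else
      let count := PySem.List.pyGetD counts delta 0  -- always in range (delta ∈ [1,9], len 10)
      if count = 0 then pvALoop rest counts total k
      else
        let m := min (PySem.Int.floordiv k delta) count
        pvALoop rest counts (total + m) (k - m * delta)

def calculate_solution_py (n : Int) (k : Int) (a_list : List Int) : Int :=
  let total := (a_list.map (fun x => PySem.Int.floordiv x 10)).sum
  let counts := a_list.foldl pvACountStep (List.replicate 10 0)
  let p := pvALoop (PySem.List.pyRange 9 0 (-1)) counts total k
  min (p.1 + PySem.Int.floordiv p.2 10) (10 * n)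

-- ===== PORT B =====
-- the inner recursive helper 'go(d, k)'; d counts down 9..0, ported as structural Nat recursion
def pvGo (a_list : List Int) : Nat → Int → Int
  | 0, k => PySem.Int.floordiv k 10            -- 'if d == 0 or k <= 0: return k // 10'
  | d + 1, k =>
    if k ≤ 0 then PySem.Int.floordiv k 10
    else
      -- sum(1 for x in a_list if x % 10 == 10 - d) ported as countP
      let m := min (PySem.Int.floordiv k ((d : Int) + 1))
        ((a_list.countP (fun x => PySem.Int.mod x 10 == 10 - ((d : Int) + 1)) : Int))
      m + pvGo a_list d (k - m * ((d : Int) + 1))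

def calculate_solution_py_alt (n : Int) (k : Int) (a_list : List Int) : Int :=
  min ((a_list.map (fun x => PySem.Int.floordiv x 10)).sum + pvGo a_list 9 k) (10 * n)

-- ===== PRECONDITION & SPEC =====
def Spec_calculate_solution_py (n : Int) (k : Int) (a_list : List Int) (out : Int) : Prop := out = calculate_solution_py_alt n k a_list
instance (n : Int) (k : Int) (a_list : List Int) (out : Int) : Decidable (Spec_calculate_solution_py n k a_list out) := by unfold Spec_calculate_solution_py; infer_instance

-- ===== CLAIM (what is proved, stated in full; the proofs are below) =====
def Claim_equal_calculate_solution_py : Prop := ∀ (n : Int) (k : Int) (a_list : List Int), Dom_calculate_solution_py n k a_list → Spec_calculate_solution_py n k a_list (calculate_solution_py n k a_list)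

-- ===== LEMMAS AND PROOFS =====

-- the descending list [d, d-1, …, 1] that A's range(9,0,-1) produces for d = 9
def pvDesc : Nat → List Int
  | 0 => []
  | d + 1 => ((d : Int) + 1) :: pvDesc d

-- the completion costs (used only to re-state A's counts array)
def pvCosts (l : List Int) : List Int :=
  l.filterMap (fun x =>
    if PySem.Int.mod x 10 ≠ 0 then some (10 - PySem.Int.mod x 10) else none)

-- the counts array built by A's first loop holds the multiplicities of pvCosts
lemma pvACountStep_spec : ∀ (l : List Int) (cs : List Int), cs.length = 10 →
    (l.foldl pvACountStep cs).length = 10 ∧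
    ∀ j : Nat, j < 10 →
      (l.foldl pvACountStep cs).getD j 0 = cs.getD j 0 + ((pvCosts l).count (j : Int) : Int) := by
  intro l
  induction l with
  | nil =>
    intro cs h10
    refine ⟨h10, ?_⟩
    intro j hj
    simp only [List.foldl_nil, pvCosts, List.filterMap_nil, List.count_nil]
    omega
  | cons x l ih =>
    intro cs h10
    rw [List.foldl_cons]
    have h0 := PySem.Int.mod_nonneg x (show (0:Int) < 10 by norm_num)
    have h1 := PySem.Int.mod_lt x (show (0:Int) < 10 by norm_num)
    by_cases hz : PySem.Int.mod x 10 = 0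
    · have hstep : pvACountStep cs x = cs := by
        simp only [pvACountStep]
        rw [if_neg (not_not_intro hz)]
      have hcosts : pvCosts (x :: l) = pvCosts l := by
        unfold pvCosts
        rw [List.filterMap_cons, if_neg (not_not_intro hz)]
      rw [hstep, hcosts]
      exact ih cs h10
    · have hd1 : 1 ≤ 10 - PySem.Int.mod x 10 := by omega
      have hd9 : 10 - PySem.Int.mod x 10 ≤ 9 := by omega
      have hstep : pvACountStep cs x =
          cs.set (10 - PySem.Int.mod x 10).toNat
            (cs.getD (10 - PySem.Int.mod x 10).toNat 0 + 1) := by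
        simp only [pvACountStep]
        rw [if_pos hz, if_pos ⟨hd1, hd9⟩]
        rw [PySem.List.pySetD_of_nonneg (h := by omega) cs _]
        rw [PySem.List.pyGetD_of_nonneg (h := by omega) cs 0]
      have hlen2 : (cs.set (10 - PySem.Int.mod x 10).toNat
          (cs.getD (10 - PySem.Int.mod x 10).toNat 0 + 1)).length = 10 := by simp [h10]
      obtain ⟨L, H⟩ := ih _ hlen2
      rw [hstep]
      refine ⟨L, ?_⟩
      intro j hj
      rw [H j hj]
      have hcosts : pvCosts (x :: l) = (10 - PySem.Int.mod x 10) :: pvCosts l := by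
        unfold pvCosts
        rw [List.filterMap_cons, if_pos hz]
      rw [hcosts, List.count_cons]
      have hdn : (10 - PySem.Int.mod x 10).toNat < cs.length := by omega
      by_cases hdj : (10 - PySem.Int.mod x 10).toNat = j
      · have hset : (cs.set (10 - PySem.Int.mod x 10).toNat
            (cs.getD (10 - PySem.Int.mod x 10).toNat 0 + 1)).getD j 0 =
            cs.getD (10 - PySem.Int.mod x 10).toNat 0 + 1 := by
          rw [← hdj, List.getD_eq_getElem?_getD, List.getElem?_set_self hdn, Option.getD_some]
        have hbeq : ((10 - PySem.Int.mod x 10 : Int) == (j : Int)) = true := by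
          simp only [beq_iff_eq]; omega
        rw [hset, hbeq, ← hdj]
        simp only [if_true]
        push_cast
        ring
      · have hset : (cs.set (10 - PySem.Int.mod x 10).toNat
            (cs.getD (10 - PySem.Int.mod x 10).toNat 0 + 1)).getD j 0 = cs.getD j 0 := by
          rw [List.getD_eq_getElem?_getD, List.getElem?_set_ne hdj]
          rfl
        have hbeq : ((10 - PySem.Int.mod x 10 : Int) == (j : Int)) = false := by
          simp only [beq_eq_false_iff_ne, ne_eq]
          omega
        rw [hset, hbeq]
        simp only [Bool.false_eq_true, if_false]
        push_cast
        ring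

-- pvCosts multiplicities agree with B's on-demand bucket counts
lemma pvCosts_count_eq_cnt (l : List Int) (j : Int) (h1 : 1 ≤ j) (h9 : j ≤ 9) :
    ((pvCosts l).count j : Int)
      = ((l.countP (fun x => PySem.Int.mod x 10 == 10 - j)) : Int) := by
  induction l with
  | nil => simp [pvCosts]
  | cons x l ih =>
    have h0 := PySem.Int.mod_nonneg x (show (0:Int) < 10 by norm_num)
    have hlt := PySem.Int.mod_lt x (show (0:Int) < 10 by norm_num)
    by_cases hz : PySem.Int.mod x 10 = 0
    · have hcosts : pvCosts (x :: l) = pvCosts l := by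
        unfold pvCosts; rw [List.filterMap_cons, if_neg (not_not_intro hz)]
      have hb : (PySem.Int.mod x 10 == 10 - j) = false := by
        simp only [beq_eq_false_iff_ne, ne_eq]; omega
      rw [hcosts, List.countP_cons, hb]
      simpa using ih
    · have hcosts : pvCosts (x :: l) = (10 - PySem.Int.mod x 10) :: pvCosts l := by
        unfold pvCosts; rw [List.filterMap_cons, if_pos hz]
      rw [hcosts, List.count_cons, List.countP_cons]
      have hiff : ((10 - PySem.Int.mod x 10 : Int) == j) = (PySem.Int.mod x 10 == 10 - j) := by
        rw [Bool.eq_iff_iff]; simp only [beq_iff_eq]; omega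
      rw [hiff]
      split_ifs <;> push_cast <;> omega

-- A's bucket loop over [d,…,1] computes B's recursive descent pvGo
lemma pvKey (l : List Int) : ∀ (d : Nat) (counts : List Int) (t k : Int),
    (∀ j : Int, 1 ≤ j → j ≤ (d : Int) → PySem.List.pyGetD counts j 0
      = ((l.countP (fun x => PySem.Int.mod x 10 == 10 - j)) : Int)) →
    (pvALoop (pvDesc d) counts t k).1 + PySem.Int.floordiv (pvALoop (pvDesc d) counts t k).2 10
      = t + pvGo l d k := by
  intro d
  induction d with
  | zero => intro counts t k _; simp [pvDesc, pvALoop, pvGo]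
  | succ d ih =>
    intro counts t k h
    by_cases hk : k ≤ 0
    · simp [pvDesc, pvALoop, pvGo, hk]
    · have hcnt : PySem.List.pyGetD counts ((d : Int) + 1) 0
          = ((l.countP (fun x => PySem.Int.mod x 10 == 10 - ((d : Int) + 1))) : Int) :=
        h _ (by omega) (by push_cast; omega)
      have hq : 0 ≤ PySem.Int.floordiv k ((d : Int) + 1) := by
        rw [PySem.Int.floordiv_eq_ediv_of_pos (by omega)]
        exact Int.ediv_nonneg (by omega) (by omega)
      have hih : ∀ j : Int, 1 ≤ j → j ≤ (d : Int) → PySem.List.pyGetD counts j 0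
          = ((l.countP (fun x => PySem.Int.mod x 10 == 10 - j)) : Int) :=
        fun j hj1 hjd => h j hj1 (by omega)
      show (pvALoop (((d : Int) + 1) :: pvDesc d) counts t k).1
          + PySem.Int.floordiv (pvALoop (((d : Int) + 1) :: pvDesc d) counts t k).2 10
          = t + pvGo l (d + 1) k
      simp only [pvALoop, pvGo, if_neg hk]
      rw [hcnt]
      by_cases hc : ((l.countP (fun x => PySem.Int.mod x 10 == 10 - ((d : Int) + 1))) : Int) = 0
      · rw [if_pos hc, ih counts t k hih, hc]
        have hm : min (PySem.Int.floordiv k ((d : Int) + 1)) (0 : Int) = 0 := min_eq_right hq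
        rw [hm]
        norm_num
      · rw [if_neg hc, ih counts _ _ hih]
        ring

-- ===== VERDICT (by name: the statement is the Claim_ definition above) =====
theorem calculate_solution_py_spec : Claim_equal_calculate_solution_py := by
  intro n k l _
  unfold Spec_calculate_solution_py
  simp only [calculate_solution_py, calculate_solution_py_alt]
  have hrange : PySem.List.pyRange 9 0 (-1) = pvDesc 9 := by decide
  rw [hrange]
  obtain ⟨hL, hspec⟩ := pvACountStep_spec l (List.replicate 10 0) (by simp)
  have h : ∀ j : Int, 1 ≤ j → j ≤ (9 : Int) →
      PySem.List.pyGetD (l.foldl pvACountStep (List.replicate 10 0)) j 0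
          = ((l.countP (fun x => PySem.Int.mod x 10 == 10 - j)) : Int) := by
    intro j h1 h9
    rw [PySem.List.pyGetD_of_nonneg (h := by omega) _ 0]
    rw [hspec j.toNat (by omega)]
    have hj : ((j.toNat : Nat) : Int) = j := Int.toNat_of_nonneg (by omega)
    rw [hj, pvCosts_count_eq_cnt l j h1 h9,
      List.getD_eq_getElem?_getD, List.getElem?_replicate]
    have hlt : j.toNat < 10 := by omega
    simp [hlt]
  rw [pvKey l 9 _ _ k h]
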